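-- pv_equiv track=rewrite | github.com/numba/numba-rvsdg | a.py | foo
-- ===== SOURCE A (Python) =====
-- def foo(a):
--     sz = len(a)
--     s = 0
--     if sz > 5:
--         for i in range(sz):
--             s += sz
--         s += sz
--     else:
--         s -= sz
--     s += 1
--     return s
-- ===== SOURCE B (Python) =====
-- def foo(a):
--     sz = len(a)
--     return sz * sz + sz + 1 if sz > 5 else 1 - sz
-- ===== Notes on version B (the rewrite author's own statement) =====
-- stated objective: faster
-- what changed: Replaced the O(n) accumulation loop with the closed form sz*sz + sz + 1 (sz > 5) / 1 - sz.
import Mathlib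
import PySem

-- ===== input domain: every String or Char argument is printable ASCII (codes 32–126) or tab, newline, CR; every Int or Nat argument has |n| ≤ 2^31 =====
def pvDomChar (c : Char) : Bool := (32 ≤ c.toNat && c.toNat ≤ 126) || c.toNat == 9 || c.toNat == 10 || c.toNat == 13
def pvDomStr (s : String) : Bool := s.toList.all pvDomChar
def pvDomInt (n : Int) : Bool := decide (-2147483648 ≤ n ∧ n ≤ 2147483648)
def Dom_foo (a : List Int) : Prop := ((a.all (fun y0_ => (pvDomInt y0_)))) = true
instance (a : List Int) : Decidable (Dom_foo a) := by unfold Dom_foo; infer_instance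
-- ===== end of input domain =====

-- B replaces A's O(n) accumulation loop by the closed form sz*sz + sz + 1 / 1 - sz (faster).

-- ===== PORT A =====
def foo (a : List Int) : Int :=
  let sz : Int := a.length
  let s : Int := 0
  let s :=
    if sz > 5 then
      let s := (PySem.List.pyRange 0 sz 1).foldl (fun s _ => s + sz) s
      s + sz
    else
      s - sz
  s + 1

-- ===== PORT B =====
def foo_alt (a : List Int) : Int :=
  let sz : Int := a.length
  if sz > 5 then sz * sz + sz + 1 else 1 - sz

-- ===== PRECONDITION & SPEC =====
def Spec_foo (a : List Int) (out : Int) : Prop := out = foo_alt a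
instance (a : List Int) (out : Int) : Decidable (Spec_foo a out) := by unfold Spec_foo; infer_instance

-- ===== CLAIM (what is proved, stated in full; the proofs are below) =====
def Claim_equal_foo : Prop := ∀ (a : List Int), Dom_foo a → Spec_foo a (foo a)

-- ===== LEMMAS AND PROOFS =====

lemma foldl_const_add (c : Int) (l : List Int) (s : Int) :
    l.foldl (fun s _ => s + c) s = s + c * l.length := by
  induction l generalizing s with
  | nil => simp
  | cons x xs ih => simp [List.foldl, ih]; ring

lemma pyRange_len (n : Int) (hn : 0 ≤ n) :
    ((PySem.List.pyRange 0 n 1).length : Int) = n := by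
  rw [PySem.List.length_pyRange_one]
  omega

-- ===== VERDICT (by name: the statement is the Claim_ definition above) =====
theorem foo_spec : Claim_equal_foo := by
  intro a _
  unfold Spec_foo foo foo_alt
  set sz : Int := (a.length : Int) with hsz
  have hnn : 0 ≤ sz := by positivity
  by_cases h : sz > 5
  · simp only [h, if_pos, foldl_const_add]
    rw [pyRange_len sz hnn]
    ring
  · simp [h]; ring
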